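-- pv_equiv track=rewrite | github.com/cirosantilli/project-euler-solvers | solvers/468.py | largest_smooth_divisor
-- ===== SOURCE A (Python) =====
-- def largest_smooth_divisor(B: int, n: int) -> int:
--     """Largest divisor of n whose prime factors are all <= B (exact integer, not mod)."""
--     if n <= 1 or B <= 1:
--         return 1 if n != 0 else 0
--     x = n
--     res = 1
--     p = 2
--     while p * p <= x and p <= B:
--         if x % p == 0:
--             while x % p == 0:
--                 x //= p
--                 res *= p
--         p += 1 if p == 2 else 2  # 2 then odds
--     # if remaining prime factor is <= B, include it
--     if x > 1 and x <= B:
--         res *= x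
--     return res
-- ===== SOURCE B (Python) =====
-- def largest_smooth_divisor(B: int, n: int) -> int:
--     """Largest divisor of n whose prime factors are all <= B (exact integer, not mod)."""
--     if n == 0:
--         return 0
--     if n <= 1 or B <= 1:
--         return 1
--     # Phase 1: full factorization of n by trial division (independent of B).
--     fac = []
--     x = n
--     p = 2
--     while p * p <= x:
--         e = 0
--         while x % p == 0:
--             x //= p
--             e += 1
--         if e:
--             fac.append((p, e))
--         p += 1
--     if x > 1:
--         fac.append((x, 1))
--     # Phase 2: keep only the primes <= B.
--     res = 1
--     for q, e in fac:
--         if q <= B: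
--             res *= q ** e
--     return res
-- ===== Notes on version B (the rewrite author's own statement) =====
-- stated objective: alternative
-- what changed: Replaces A's single B-bounded strip-and-accumulate loop with a leftover patch by a two-phase shape: first a complete trial-division factorization of n into a (prime, exponent) list, then a separate filter pass multiplying p**e for primes p <= B.
import Mathlib
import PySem

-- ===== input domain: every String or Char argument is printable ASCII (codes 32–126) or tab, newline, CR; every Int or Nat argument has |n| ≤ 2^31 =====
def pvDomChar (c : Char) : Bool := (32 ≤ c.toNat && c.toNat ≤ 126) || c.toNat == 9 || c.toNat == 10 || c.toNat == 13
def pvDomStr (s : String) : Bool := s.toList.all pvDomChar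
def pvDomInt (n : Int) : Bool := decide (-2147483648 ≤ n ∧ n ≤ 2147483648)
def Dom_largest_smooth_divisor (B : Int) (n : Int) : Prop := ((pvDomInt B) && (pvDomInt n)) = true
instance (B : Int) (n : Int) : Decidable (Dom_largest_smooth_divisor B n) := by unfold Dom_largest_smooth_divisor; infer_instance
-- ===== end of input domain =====

-- B re-implements A as factorize-then-filter (two separate passes); equivalence of the two
-- integer results is proved for all inputs (no precondition).

-- ===== PORT A =====
-- termination facts for the loops (cited by name in decreasing_by; kept tiny on purpose)
theorem pvTermInner {x p : Int} (h2 : 2 ≤ p) (h1 : 1 ≤ x) (hm : PySem.Int.mod x p = 0) :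
    (PySem.Int.floordiv x p).toNat < x.toNat := by
  have hp0 : (0:Int) < p := by omega
  have hdv := PySem.Int.floordiv_eq_ediv_of_pos (a := x) hp0
  have h1' : PySem.Int.floordiv x p < x := by
    rw [hdv, Int.ediv_lt_iff_lt_mul (by omega)]; nlinarith
  have h2' : 0 ≤ PySem.Int.floordiv x p := by
    rw [hdv]; exact Int.ediv_nonneg (by omega) (by omega)
  omega

theorem pvTermOuter {x x' p s : Int} (hpx : p * p ≤ x) (hp : 2 ≤ p) (hle : x' ≤ x)
    (hs : 1 ≤ s) : (x' + 1 - (p + s)).toNat < (x + 1 - p).toNat := by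
  have h2p : 2 * p ≤ x := le_trans (by nlinarith) hpx
  omega

-- inner `while x % p == 0: x //= p; res *= p`; the `2 ≤ p ∧ 1 ≤ x` conjuncts only make the
-- recursion total (they hold on every state A's code reaches)
def pvInnerA (x res p : Int) : Int × Int :=
  if h : 2 ≤ p ∧ 1 ≤ x ∧ PySem.Int.mod x p = 0 then
    pvInnerA (PySem.Int.floordiv x p) (res * p) p
  else (x, res)
termination_by x.toNat
decreasing_by exact pvTermInner h.1 h.2.1 h.2.2

-- bounds needed for the termination of the outer loop
theorem pvInnerA_fst_le (x res p : Int) : (pvInnerA x res p).1 ≤ x ∧ (1 ≤ x → 1 ≤ (pvInnerA x res p).1) := by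
  fun_induction pvInnerA x res p with
  | case1 x res h ih =>
    obtain ⟨hp, hx, hm⟩ := h
    have hp0 : (0:Int) < p := by omega
    have hdv := PySem.Int.floordiv_eq_ediv_of_pos (a := x) hp0
    have h1 : PySem.Int.floordiv x p < x := by
      rw [hdv, Int.ediv_lt_iff_lt_mul (by omega)]; nlinarith
    have hd : p ∣ x := (PySem.Int.mod_eq_zero_iff_dvd x p).mp hm
    have h2 : 1 ≤ PySem.Int.floordiv x p := by
      rw [hdv]
      obtain ⟨c, hc⟩ := hd
      have hc1 : 1 ≤ c := by nlinarith
      calc (1:Int) ≤ c := hc1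
        _ = x / p := by rw [hc]; rw [Int.mul_ediv_cancel_left _ (by omega)]
    exact ⟨le_trans ih.1 (le_of_lt h1), fun _ => ih.2 h2⟩
  | case2 x res h => exact ⟨le_refl _, fun h => h⟩

-- outer `while p * p <= x and p <= B` loop of A, returning the final (x, res);
-- the `2 ≤ p ∧ 1 ≤ x` conjuncts only make the recursion total
def pvOuterA (Bb x res p : Int) : Int × Int :=
  if h : p * p ≤ x ∧ p ≤ Bb ∧ 2 ≤ p ∧ 1 ≤ x then
    if PySem.Int.mod x p = 0 then
      pvOuterA Bb (pvInnerA x res p).1 (pvInnerA x res p).2 (p + if p = 2 then 1 else 2)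
    else
      pvOuterA Bb x res (p + if p = 2 then 1 else 2)
  else (x, res)
termination_by (x + 1 - p).toNat
decreasing_by
  · exact pvTermOuter h.1 h.2.2.1 (pvInnerA_fst_le x res p).1 (by split <;> omega)
  · exact pvTermOuter h.1 h.2.2.1 (le_refl x) (by split <;> omega)

def largest_smooth_divisor (B : Int) (n : Int) : Int :=
  if n ≤ 1 ∨ B ≤ 1 then (if n ≠ 0 then 1 else 0)
  else
    let r := pvOuterA B n 1 2
    if 1 < r.1 ∧ r.1 ≤ B then r.2 * r.1 else r.2

-- ===== PORT B =====
-- inner `while x % p == 0: x //= p; e += 1`; same totality guards as above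
def pvInnerB (x e p : Int) : Int × Int :=
  if h : 2 ≤ p ∧ 1 ≤ x ∧ PySem.Int.mod x p = 0 then
    pvInnerB (PySem.Int.floordiv x p) (e + 1) p
  else (x, e)
termination_by x.toNat
decreasing_by exact pvTermInner h.1 h.2.1 h.2.2

theorem pvInnerB_fst_le (x e p : Int) : (pvInnerB x e p).1 ≤ x := by
  fun_induction pvInnerB x e p with
  | case1 x e h ih =>
    obtain ⟨hp, hx, hm⟩ := h
    have hp0 : (0:Int) < p := by omega
    have hdv := PySem.Int.floordiv_eq_ediv_of_pos (a := x) hp0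
    have h1 : PySem.Int.floordiv x p < x := by
      rw [hdv, Int.ediv_lt_iff_lt_mul (by omega)]; nlinarith
    exact le_trans ih (le_of_lt h1)
  | case2 x e h => exact le_refl _

-- outer `while p * p <= x` factorization loop of B, accumulating the factor list
def pvOuterB (x p : Int) (fac : List (Int × Int)) : Int × List (Int × Int) :=
  if h : p * p ≤ x ∧ 2 ≤ p ∧ 1 ≤ x then
    pvOuterB (pvInnerB x 0 p).1 (p + 1)
      (if (pvInnerB x 0 p).2 ≠ 0 then fac ++ [(p, (pvInnerB x 0 p).2)] else fac)
  else (x, fac)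
termination_by (x + 1 - p).toNat
decreasing_by exact pvTermOuter h.1 h.2.1 (pvInnerB_fst_le x 0 p) (le_refl 1)

-- `res *= q ** e` ported as `res * q ^ e.toNat` (exact: every recorded exponent is ≥ 1)
def largest_smooth_divisor_alt (B : Int) (n : Int) : Int :=
  if n = 0 then 0
  else if n ≤ 1 ∨ B ≤ 1 then 1
  else
    let r := pvOuterB n 2 []
    let fac := if 1 < r.1 then r.2 ++ [(r.1, 1)] else r.2
    fac.foldl (fun res qe => if qe.1 ≤ B then res * qe.1 ^ qe.2.toNat else res) 1

-- ===== PRECONDITION & SPEC =====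
def Spec_largest_smooth_divisor (B : Int) (n : Int) (out : Int) : Prop := out = largest_smooth_divisor_alt B n
instance (B : Int) (n : Int) (out : Int) : Decidable (Spec_largest_smooth_divisor B n out) := by unfold Spec_largest_smooth_divisor; infer_instance

-- ===== CLAIM (what is proved, stated in full; the proofs are below) =====
def Claim_equal_largest_smooth_divisor : Prop := ∀ (B : Int) (n : Int), Dom_largest_smooth_divisor B n → Spec_largest_smooth_divisor B n (largest_smooth_divisor B n)

-- ===== LEMMAS AND PROOFS =====

-- "x has no divisor q with 2 ≤ q < p"
def pvNoF (x p : Int) : Prop := ∀ q : Int, 2 ≤ q → q < p → ¬ q ∣ x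

-- the filter-and-multiply pass of B as a function of the factor list
def pvProd (Bb : Int) (l : List (Int × Int)) : Int :=
  l.foldl (fun res qe => if qe.1 ≤ Bb then res * qe.1 ^ qe.2.toNat else res) 1

-- B's whole tail result from loop state (x, p)
def pvBres (Bb x p : Int) : Int :=
  let r := pvOuterB x p []
  pvProd Bb (if 1 < r.1 then r.2 ++ [(r.1, 1)] else r.2)

theorem pvProd_foldl (Bb : Int) (l : List (Int × Int)) (r : Int) :
    l.foldl (fun res qe => if qe.1 ≤ Bb then res * qe.1 ^ qe.2.toNat else res) r = r * pvProd Bb l := by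
  induction l generalizing r with
  | nil => simp [pvProd]
  | cons a l ih =>
    rw [List.foldl_cons, ih]
    have h1 : pvProd Bb (a :: l)
        = (if a.1 ≤ Bb then 1 * a.1 ^ a.2.toNat else 1) * pvProd Bb l := by
      show List.foldl _ _ _ = _
      rw [List.foldl_cons, ih]
    rw [h1]
    split <;> ring

theorem pvProd_cons (Bb q e : Int) (l : List (Int × Int)) :
    pvProd Bb ((q, e) :: l) = (if q ≤ Bb then q ^ e.toNat else 1) * pvProd Bb l := by
  show List.foldl _ _ _ = _
  rw [List.foldl_cons, pvProd_foldl]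
  split <;> ring

theorem pvProd_one (Bb : Int) (l : List (Int × Int)) (h : ∀ qe ∈ l, ¬ qe.1 ≤ Bb) :
    pvProd Bb l = 1 := by
  induction l with
  | nil => rfl
  | cons a l ih =>
    obtain ⟨q, e⟩ := a
    rw [pvProd_cons, if_neg (h (q, e) (List.mem_cons_self)),
        ih (fun qe hqe => h qe (List.mem_cons_of_mem _ hqe))]
    ring

-- the two inner loops compute the same final x, and A's res is B's count turned into a power
theorem pvInner_rel (x res e p : Int) :
    pvInnerA x res p = ((pvInnerB x e p).1, res * p ^ ((pvInnerB x e p).2 - e).toNat)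
      ∧ e ≤ (pvInnerB x e p).2 := by
  fun_induction pvInnerB x e p generalizing res with
  | case1 x e h ih =>
    obtain ⟨hp', hx', hm⟩ := h
    obtain ⟨ih1, ih2⟩ := ih (res * p)
    constructor
    · rw [pvInnerA, dif_pos ⟨hp', hx', hm⟩, ih1]
      congr 1
      have hE : ((pvInnerB (PySem.Int.floordiv x p) (e + 1) p).2 - e).toNat
          = ((pvInnerB (PySem.Int.floordiv x p) (e + 1) p).2 - (e + 1)).toNat + 1 := by omega
      rw [hE, pow_succ]
      ring
    · omega
  | case2 x e h =>
    constructor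
    · rw [pvInnerA, dif_neg h]
      simp
    · exact le_refl _

-- everything the proofs need to know about B's inner loop
theorem pvInnerB_spec (x e p : Int) : 2 ≤ p → 1 ≤ x →
    1 ≤ (pvInnerB x e p).1 ∧ (pvInnerB x e p).1 ∣ x ∧ ¬ p ∣ (pvInnerB x e p).1
      ∧ (p ∣ x → e < (pvInnerB x e p).2) ∧ (¬ p ∣ x → pvInnerB x e p = (x, e)) := by
  fun_induction pvInnerB x e p with
  | case1 x e h ih =>
    intro hp hx
    obtain ⟨hp', hx', hm⟩ := h
    have hdv := PySem.Int.floordiv_eq_ediv_of_pos (a := x) (show (0:Int) < p by omega)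
    have hd : p ∣ x := (PySem.Int.mod_eq_zero_iff_dvd x p).mp hm
    have hfd : PySem.Int.floordiv x p ∣ x := by
      rw [hdv]
      obtain ⟨c, hc⟩ := hd
      exact ⟨p, by rw [hc, Int.mul_ediv_cancel_left _ (by omega)]; ring⟩
    have hx1 : 1 ≤ PySem.Int.floordiv x p := by
      rw [hdv]
      obtain ⟨c, hc⟩ := hd
      have hc1 : 1 ≤ c := by nlinarith
      calc (1:Int) ≤ c := hc1
        _ = x / p := by rw [hc]; rw [Int.mul_ediv_cancel_left _ (by omega)]
    obtain ⟨i1, i2, i3, i4, i5⟩ := ih hp hx1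
    refine ⟨i1, dvd_trans i2 hfd, i3, fun _ => ?_, fun hc => absurd hd hc⟩
    by_cases hpd : p ∣ PySem.Int.floordiv x p
    · have := i4 hpd; omega
    · rw [(i5 hpd)]; omega
  | case2 x e h =>
    intro hp hx
    have hm : ¬ p ∣ x := by
      intro hd
      exact h ⟨hp, hx, (PySem.Int.mod_eq_zero_iff_dvd x p).mpr hd⟩
    exact ⟨hx, dvd_refl x, hm, fun hd => absurd hd hm, fun _ => rfl⟩

-- the factor-list accumulator only ever grows at the end
theorem pvOuterB_acc (m : Nat) : ∀ (x p : Int) (fac : List (Int × Int)), (x + 1 - p).toNat = m →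
    pvOuterB x p fac = ((pvOuterB x p []).1, fac ++ (pvOuterB x p []).2) := by
  induction m using Nat.strong_induction_on with
  | _ m IH =>
    intro x p fac hm
    by_cases h : p * p ≤ x ∧ 2 ≤ p ∧ 1 ≤ x
    · obtain ⟨hpx, hp, hx⟩ := h
      have h2p : 2 * p ≤ x := le_trans (by nlinarith) hpx
      have hle := pvInnerB_fst_le x 0 p
      have hmeas : ((pvInnerB x 0 p).1 + 1 - (p + 1)).toNat < m := by omega
      rw [pvOuterB, dif_pos ⟨hpx, hp, hx⟩]
      conv_rhs => rw [pvOuterB, dif_pos ⟨hpx, hp, hx⟩]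
      rw [IH _ hmeas _ _ _ rfl,
          IH _ hmeas _ _ (if (pvInnerB x 0 p).2 ≠ 0 then [] ++ [(p, (pvInnerB x 0 p).2)] else []) rfl]
      split <;> simp
    · rw [pvOuterB, dif_neg h]
      conv_rhs => rw [pvOuterB, dif_neg h]
      simp

-- a prime candidate that does not divide x contributes nothing: skip it
theorem pvBres_skip (Bb x p : Int) (hp : 2 ≤ p) (hx : 1 ≤ x) (hnd : ¬ p ∣ x) :
    pvBres Bb x p = pvBres Bb x (p + 1) := by
  unfold pvBres
  by_cases h : p * p ≤ x
  · have hspec := pvInnerB_spec x 0 p hp hx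
    rw [pvOuterB, dif_pos ⟨h, hp, hx⟩, (hspec.2.2.2.2 hnd)]
    simp
  · have h2 : ¬ (p + 1) * (p + 1) ≤ x := by nlinarith
    rw [pvOuterB, dif_neg (by tauto), pvOuterB, dif_neg (by tauto)]

-- B's tail from (x, p) unrolls one dividing step into a leading (p, e) factor
theorem pvBres_step (Bb x p : Int) (hp : 2 ≤ p) (hx : 1 ≤ x) (hpx : p * p ≤ x) (hd : p ∣ x) :
    pvBres Bb x p
      = (if p ≤ Bb then p ^ ((pvInnerB x 0 p).2).toNat else 1) * pvBres Bb (pvInnerB x 0 p).1 (p + 1) := by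
  have hspec := pvInnerB_spec x 0 p hp hx
  have hE : (pvInnerB x 0 p).2 ≠ 0 := by have := hspec.2.2.2.1 hd; omega
  unfold pvBres
  rw [pvOuterB, dif_pos ⟨hpx, hp, hx⟩, if_pos hE]
  rw [pvOuterB_acc _ _ _ _ rfl]
  simp only [List.nil_append, List.singleton_append]
  split
  · rw [List.cons_append, pvProd_cons]
  · rw [pvProd_cons]

-- with no divisor below p, every factor B records from (x, p) on is ≥ p (leftover included)
theorem pvOuterB_ge (m : Nat) : ∀ (x p : Int), (x + 1 - p).toNat = m → 1 ≤ x → 2 ≤ p → pvNoF x p →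
    (∀ qe ∈ (pvOuterB x p []).2, p ≤ qe.1) ∧ (1 < (pvOuterB x p []).1 → p ≤ (pvOuterB x p []).1) := by
  induction m using Nat.strong_induction_on with
  | _ m IH =>
    intro x p hm hx hp hnf
    by_cases h : p * p ≤ x
    · obtain ⟨i1, i2, i3, _, _⟩ := pvInnerB_spec x 0 p hp hx
      have hle := pvInnerB_fst_le x 0 p
      have h2p : 2 * p ≤ x := le_trans (by nlinarith) h
      have hnf' : pvNoF (pvInnerB x 0 p).1 (p + 1) := by
        intro q hq1 hq2 hqd
        rcases lt_or_eq_of_le (show q ≤ p by omega) with hlt | heq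
        · exact hnf q hq1 hlt (dvd_trans hqd i2)
        · exact i3 (heq ▸ hqd)
      have hmeas : ((pvInnerB x 0 p).1 + 1 - (p + 1)).toNat < m := by omega
      obtain ⟨g1, g2⟩ := IH _ hmeas _ _ rfl i1 (by omega) hnf'
      rw [pvOuterB, dif_pos ⟨h, hp, hx⟩, pvOuterB_acc _ _ _ _ rfl]
      constructor
      · intro qe hqe
        simp only [List.nil_append] at hqe
        rcases List.mem_append.mp (by
          revert hqe; split <;> intro hqe
          · exact hqe
          · exact List.mem_append.mpr (Or.inr hqe)) with hmem | hmem
        · simp only [List.mem_singleton] at hmem; rw [hmem]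
        · exact le_trans (by omega) (g1 qe hmem)
      · intro hgt
        exact le_trans (by omega) (g2 hgt)
    · rw [pvOuterB, dif_neg (by tauto)]
      refine ⟨by simp, fun hgt => ?_⟩
      by_contra hlt
      exact hnf x (by omega) (by omega) (dvd_refl x)

-- MAIN LEMMA: A's loop + final patch from state (x, res, p) equals res times B's tail from (x, p)
theorem pvMain (m : Nat) : ∀ (Bb x res p : Int), (x + 1 - p).toNat = m →
    1 ≤ x → 2 ≤ p → (p = 2 ∨ p % 2 = 1) → pvNoF x p →
    (if 1 < (pvOuterA Bb x res p).1 ∧ (pvOuterA Bb x res p).1 ≤ Bb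
      then (pvOuterA Bb x res p).2 * (pvOuterA Bb x res p).1 else (pvOuterA Bb x res p).2)
    = res * pvBres Bb x p := by
  induction m using Nat.strong_induction_on with
  | _ m IH =>
    intro Bb x res p hm hx hp hpar hnf
    by_cases hg : p * p ≤ x ∧ p ≤ Bb
    · -- loop body runs
      obtain ⟨hpx, hB⟩ := hg
      have h2p : 2 * p ≤ x := le_trans (by nlinarith) hpx
      set s : Int := if p = 2 then 1 else 2 with hs
      have hs12 : s = 1 ∨ s = 2 := by rw [hs]; split <;> simp
      have hpar' : p + s = 2 ∨ (p + s) % 2 = 1 := by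
        rcases hpar with h2 | hodd
        · right; rw [hs, if_pos h2, h2]; decide
        · right
          have : p ≠ 2 := by omega
          rw [hs, if_neg this]; omega
      have hodd3 : p ≠ 2 → p % 2 = 1 ∧ 3 ≤ p := by
        intro hne
        rcases hpar with h2 | hodd
        · exact absurd h2 hne
        · exact ⟨hodd, by omega⟩
      have hno2 : p ≠ 2 → ¬ (2:Int) ∣ x := by
        intro hne
        exact hnf 2 (by omega) (by have := hodd3 hne; omega)
      by_cases hd : p ∣ x
      · -- stripping step
        have hm0 : PySem.Int.mod x p = 0 := (PySem.Int.mod_eq_zero_iff_dvd x p).mpr hd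
        obtain ⟨hrel, _⟩ := pvInner_rel x res 0 p
        obtain ⟨i1, i2, i3, _, _⟩ := pvInnerB_spec x 0 p hp hx
        have hle := pvInnerB_fst_le x 0 p
        set x' := (pvInnerB x 0 p).1 with hx'
        set E := (pvInnerB x 0 p).2 with hE
        have hnf' : pvNoF x' (p + 1) := by
          intro q hq1 hq2 hqd
          rcases lt_or_eq_of_le (show q ≤ p by omega) with hlt | heq
          · exact hnf q hq1 hlt (dvd_trans hqd i2)
          · exact i3 (heq ▸ hqd)
        have hnfs : pvNoF x' (p + s) := by
          rcases hs12 with h1 | h2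
          · rw [h1]; exact hnf'
          · rw [h2]
            intro q hq1 hq2 hqd
            rcases lt_or_eq_of_le (show q ≤ p + 1 by omega) with hlt | heq
            · exact hnf' q hq1 hlt hqd
            · -- q = p + 1 is even, but x' is odd
              have hpne : p ≠ 2 := by
                intro h2'; rw [hs, if_pos h2'] at h2; omega
              have h2q : (2:Int) ∣ q := by have := (hodd3 hpne).1; omega
              exact hno2 hpne (dvd_trans (heq ▸ h2q) (dvd_trans hqd i2))
        have hmeas : (x' + 1 - (p + s)).toNat < m := by
          have : 1 ≤ s := by rcases hs12 with h | h <;> omega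
          omega
        have hih := IH _ hmeas Bb x' (res * p ^ E.toNat) (p + s) rfl i1 (by omega) hpar' hnfs
        have hu : pvOuterA Bb x res p = pvOuterA Bb x' (res * p ^ E.toNat) (p + s) := by
          rw [pvOuterA, dif_pos ⟨hpx, hB, hp, hx⟩, if_pos hm0, hrel]
          rw [← hs]
          simp
        rw [hu, hih]
        have hbridge : pvBres Bb x' (p + s) = pvBres Bb x' (p + 1) := by
          rcases hs12 with h1 | h2
          · rw [h1]
          · rw [h2, show p + 2 = p + 1 + 1 by ring]
            have hpne : p ≠ 2 := by intro h2'; rw [hs, if_pos h2'] at h2; omega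
            have hnd : ¬ (p + 1) ∣ x' := by
              intro hdd
              have h2q : (2:Int) ∣ (p + 1) := by have := (hodd3 hpne).1; omega
              exact hno2 hpne (dvd_trans (dvd_trans h2q hdd) i2)
            exact (pvBres_skip Bb x' (p + 1) (by omega) i1 hnd).symm
        rw [hbridge, pvBres_step Bb x p hp hx hpx hd, if_pos hB, ← hE, ← hx']
        ring
      · -- no division: just advance p
        have hm0 : PySem.Int.mod x p ≠ 0 := fun hc => hd ((PySem.Int.mod_eq_zero_iff_dvd x p).mp hc)
        have hnfs : pvNoF x (p + s) := by
          intro q hq1 hq2 hqd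
          rcases hs12 with h1 | h2
          · rcases lt_or_eq_of_le (show q ≤ p by omega) with hlt | heq
            · exact hnf q hq1 hlt hqd
            · exact hd (heq ▸ hqd)
          · rcases lt_trichotomy q p with hlt | heq | hgt
            · exact hnf q hq1 hlt hqd
            · exact hd (heq ▸ hqd)
            · have heq1 : q = p + 1 := by omega
              have hpne : p ≠ 2 := by intro h2'; rw [hs, if_pos h2'] at h2; omega
              have h2q : (2:Int) ∣ q := by have := (hodd3 hpne).1; omega
              exact hno2 hpne (dvd_trans h2q hqd)
        have hmeas : (x + 1 - (p + s)).toNat < m := by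
          have : 1 ≤ s := by rcases hs12 with h | h <;> omega
          omega
        have hih := IH _ hmeas Bb x res (p + s) rfl hx (by omega) hpar' hnfs
        have hu : pvOuterA Bb x res p = pvOuterA Bb x res (p + s) := by
          rw [pvOuterA, dif_pos ⟨hpx, hB, hp, hx⟩, if_neg hm0]
        rw [hu, hih]
        have hbridge : pvBres Bb x p = pvBres Bb x (p + s) := by
          have h1 := pvBres_skip Bb x p hp hx hd
          rcases hs12 with hh | hh
          · rw [hh]; exact h1
          · rw [hh, h1, show p + 2 = p + 1 + 1 by ring]
            have hpne : p ≠ 2 := by intro h2'; rw [hs, if_pos h2'] at hh; omega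
            have hnd : ¬ (p + 1) ∣ x := by
              intro hdd
              have h2q : (2:Int) ∣ (p + 1) := by have := (hodd3 hpne).1; omega
              exact hno2 hpne (dvd_trans h2q hdd)
            exact pvBres_skip Bb x (p + 1) (by omega) hx hnd
        rw [hbridge]
    · -- loop exits
      have hga : ¬ (p * p ≤ x ∧ p ≤ Bb ∧ 2 ≤ p ∧ 1 ≤ x) := by tauto
      rw [pvOuterA, dif_neg hga]
      by_cases hpx : p * p ≤ x
      · -- exits because p > Bb : everything remaining is > Bb
        have hB : ¬ p ≤ Bb := by tauto
        have h2p : 2 * p ≤ x := le_trans (by nlinarith) hpx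
        obtain ⟨g1, g2⟩ := pvOuterB_ge _ x p rfl hx hp hnf
        have hxB : ¬ x ≤ Bb := by omega
        rw [if_neg (by tauto)]
        unfold pvBres
        rw [pvProd_one]
        · ring
        · intro qe hqe
          revert hqe; split <;> intro hqe
          · rcases List.mem_append.mp hqe with hmem | hmem
            · have := g1 qe hmem; omega
            · simp only [List.mem_singleton] at hmem
              have hg := g2 (by assumption)
              rw [hmem]; simpa using by omega
          · have := g1 qe hqe; omega
      · -- exits because p*p > x : at most one leftover factor
        unfold pvBres
        rw [pvOuterB, dif_neg (by tauto)]
        simp only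
        by_cases hx1 : 1 < x
        · rw [if_pos hx1, List.nil_append]
          by_cases hxB : x ≤ Bb
          · rw [if_pos ⟨hx1, hxB⟩]
            rw [show pvProd Bb [(x, (1:Int))] = x by
              rw [pvProd_cons, if_pos hxB]
              simp [pvProd]]
          · rw [if_neg (by tauto)]
            rw [show pvProd Bb [(x, (1:Int))] = 1 by
              rw [pvProd_cons, if_neg hxB]
              simp [pvProd]]
            ring
        · rw [if_neg hx1, if_neg (by tauto)]
          simp [pvProd]

-- ===== VERDICT (by name: the statement is the Claim_ definition above) =====
theorem largest_smooth_divisor_spec : Claim_equal_largest_smooth_divisor := by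
  intro B n _
  unfold Spec_largest_smooth_divisor largest_smooth_divisor largest_smooth_divisor_alt
  by_cases hg : n ≤ 1 ∨ B ≤ 1
  · rw [if_pos hg]
    split_ifs <;> omega
  · push_neg at hg
    obtain ⟨hn1, hB1⟩ := hg
    rw [if_neg (show ¬(n ≤ 1 ∨ B ≤ 1) by omega), if_neg (show ¬n = 0 by omega),
        if_neg (show ¬(n ≤ 1 ∨ B ≤ 1) by omega)]
    have h := pvMain ((n + 1 - 2).toNat) B n 1 2 rfl (by omega) (by omega) (Or.inl rfl)
      (fun q hq1 hq2 _ => by omega)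
    simpa [pvBres, pvProd] using h
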